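-- pv_equiv track=rewrite | github.com/Yusuf90/AdventOfCode-Solutions | AoC19_Yusuf/Day10/D10.py | translateInput
-- ===== SOURCE A (Python) =====
-- def translateInput(s_input):
-- 	_iTupleMap = []
-- 	_iWidthCounter = 0
-- 	_iHeightCounter = 0
-- 	_bAsteroid = False
-- 	for c_data in s_input:
-- 		if c_data == '\n':
-- 			_iWidthCounter = 0
-- 			_iHeightCounter += 1
-- 			continue
-- 		elif c_data == '#':
-- 			yield (_iWidthCounter, _iHeightCounter)
-- 		_iWidthCounter += 1
-- ===== SOURCE B (Python) =====
-- def translateInput(s_input):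
--     for y, line in enumerate(s_input.split('\n')):
--         for x, c in enumerate(line):
--             if c == '#':
--                 yield (x, y)
-- ===== Notes on version B (the rewrite author's own statement) =====
-- stated objective: idiomatic
-- what changed: Replaces the flat character-by-character scan with manual width/height counter resets by a two-stage decomposition: split the input into lines, then enumerate rows and columns with nested loops.
import Mathlib
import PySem

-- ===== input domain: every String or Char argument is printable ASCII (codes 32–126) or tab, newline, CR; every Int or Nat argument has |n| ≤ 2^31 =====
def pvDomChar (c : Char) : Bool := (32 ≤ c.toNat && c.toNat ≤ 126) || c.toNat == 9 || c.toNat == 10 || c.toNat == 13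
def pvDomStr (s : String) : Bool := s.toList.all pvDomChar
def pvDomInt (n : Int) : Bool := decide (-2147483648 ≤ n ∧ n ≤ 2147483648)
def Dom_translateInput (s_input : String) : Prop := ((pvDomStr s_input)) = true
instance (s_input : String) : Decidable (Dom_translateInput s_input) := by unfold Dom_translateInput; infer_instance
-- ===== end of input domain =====

-- B replaces A's flat character scan with manual counters by a split-into-lines plus nested row/column enumeration (same output, same cost).


-- ===== PORT A =====
-- A's single pass over the characters, carrying the width and height counters.
def pvALoop : List Char → Int → Int → List (Int × Int)
  | [], _, _ => []
  | c :: cs, w, h =>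
    if c = '\n' then pvALoop cs 0 (h + 1)
    else if c = '#' then (w, h) :: pvALoop cs (w + 1) h
    else pvALoop cs (w + 1) h

def translateInput (s_input : String) : List (Int × Int) :=
  pvALoop s_input.toList 0 0

-- ===== PORT B =====
-- hand port of str.split('\n') (single-character separator): exact — '' gives [''], separators delimit possibly-empty pieces
def pvSplitNl : List Char → List (List Char)
  | [] => [[]]
  | c :: cs =>
    if c = '\n' then [] :: pvSplitNl cs
    else
      match pvSplitNl cs with
      | [] => [[c]]
      | l :: ls => (c :: l) :: ls

-- inner loop: enumerate the characters of one line (x is the running column index)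
def pvBLine : List Char → Int → Int → List (Int × Int)
  | [], _, _ => []
  | c :: cs, x, y =>
    if c = '#' then (x, y) :: pvBLine cs (x + 1) y else pvBLine cs (x + 1) y

-- outer loop: enumerate the lines (y is the running row index)
def pvBLines : List (List Char) → Int → List (Int × Int)
  | [], _ => []
  | l :: ls, y => pvBLine l 0 y ++ pvBLines ls (y + 1)

def translateInput_alt (s_input : String) : List (Int × Int) :=
  pvBLines (pvSplitNl s_input.toList) 0

-- ===== PRECONDITION & SPEC =====
def Spec_translateInput (s_input : String) (out : List (Int × Int)) : Prop := out = translateInput_alt s_input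
instance (s_input : String) (out : List (Int × Int)) : Decidable (Spec_translateInput s_input out) := by unfold Spec_translateInput; infer_instance

-- ===== CLAIM (what is proved, stated in full; the proofs are below) =====
def Claim_equal_translateInput : Prop := ∀ (s_input : String), Dom_translateInput s_input → Spec_translateInput s_input (translateInput s_input)

-- ===== LEMMAS AND PROOFS =====
theorem pvSplitNl_ne_nil (cs : List Char) : pvSplitNl cs ≠ [] := by
  cases cs with
  | nil => simp [pvSplitNl]
  | cons c cs =>
    simp only [pvSplitNl]
    split
    · simp
    · cases h : pvSplitNl cs <;> simp

theorem pvALoop_eq (cs : List Char) (w h : Int) :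
    pvALoop cs w h =
      (match pvSplitNl cs with
       | [] => []
       | l :: ls => pvBLine l w h ++ pvBLines ls (h + 1)) := by
  induction cs generalizing w h with
  | nil => simp [pvALoop, pvSplitNl, pvBLine, pvBLines]
  | cons c cs ih =>
    by_cases hc : c = '\n'
    · obtain ⟨l, ls, hls⟩ : ∃ l ls, pvSplitNl cs = l :: ls := by
        cases hsp : pvSplitNl cs with
        | nil => exact absurd hsp (pvSplitNl_ne_nil cs)
        | cons l ls => exact ⟨l, ls, rfl⟩
      simp [pvALoop, pvSplitNl, hc, ih, hls, pvBLine, pvBLines]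
    · obtain ⟨l, ls, hls⟩ : ∃ l ls, pvSplitNl cs = l :: ls := by
        cases hsp : pvSplitNl cs with
        | nil => exact absurd hsp (pvSplitNl_ne_nil cs)
        | cons l ls => exact ⟨l, ls, rfl⟩
      simp only [pvALoop, pvSplitNl, hc, if_false, hls, ih, pvBLine]
      split <;> simp

-- ===== VERDICT (by name: the statement is the Claim_ definition above) =====
theorem translateInput_spec : Claim_equal_translateInput := by
  intro s _
  unfold Spec_translateInput translateInput translateInput_alt
  rw [pvALoop_eq]
  obtain ⟨l, ls, hls⟩ : ∃ l ls, pvSplitNl s.toList = l :: ls := by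
    cases hsp : pvSplitNl s.toList with
    | nil => exact absurd hsp (pvSplitNl_ne_nil s.toList)
    | cons l ls => exact ⟨l, ls, rfl⟩
  simp [hls, pvBLines]
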